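-- pv_equiv track=rewrite | github.com/idoradai/plex-heb-sub-converter | reverse_srt.py | FixOneLine
-- ===== SOURCE A (Python) =====
-- def reverse_clousre(s):
--     if s == '(':
--         return ')'
--     if s == ')':
--         return '('
--     return s
--
-- def FixOneLine(s):
--     if s.startswith('-') and s.endswith('-'):
--         s = s.replace('- ', '')
--         s = s.replace(' -', '')
--     s = s.replace('<i>', '')
--     s = s.replace('</i>', '')
--     if s.startswith('-') and s.endswith('-'):
--         s = s.replace('- ', '')
--         s = s.replace(' -', '')
--
--     StartSpecialChars = '.,:;''?()-?!+=*&$^%#@~`" /'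
--     EndSpecialChars = '(-*~`" /'
--     Prefix = ''
--     Suffix = ''
--
--     while (len(s) > 0 and s[0] in StartSpecialChars):
--         result = reverse_clousre(s[0])
--         Prefix += result
--         s = s[1:]
--
--     while (len(s) > 0 and s[-1] in EndSpecialChars):
--         result = reverse_clousre(s[-1])
--         Suffix += result
--         s = s[:-1]
--
--
--     if Prefix == ' -':
--         Prefix = '- '
--     if Suffix == ' -':
--         Suffix = '- '
--
--     return Suffix + s + Prefix
-- ===== SOURCE B (Python) =====
-- def FixOneLine(s):
--     if s.startswith('-') and s.endswith('-'):
--         s = s.replace('- ', '').replace(' -', '')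
--     s = s.replace('<i>', '').replace('</i>', '')
--     if s.startswith('-') and s.endswith('-'):
--         s = s.replace('- ', '').replace(' -', '')
--     START = set('.,:;?()-?!+=*&$^%#@~`" /')
--     END = set('(-*~`" /')
--     RC = {'(': ')', ')': '('}
--     n = len(s)
--     i = 0
--     while i < n and s[i] in START:
--         i += 1
--     j = n
--     while j > i and s[j - 1] in END:
--         j -= 1
--     prefix = ''.join(RC.get(c, c) for c in s[:i])
--     suffix = ''.join(RC.get(c, c) for c in reversed(s[j:]))
--     if prefix == ' -':
--         prefix = '- '
--     if suffix == ' -':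
--         suffix = '- '
--     return suffix + s[i:j] + prefix
-- ===== Notes on version B (the rewrite author's own statement) =====
-- stated objective: alternative
-- what changed: A strips special characters by repeatedly re-slicing the string (s = s[1:] / s = s[:-1] inside two while loops, each slice copying the remainder); B scans once with two index pointers from the front and the back and builds prefix/suffix/middle with three slices at the end.
import Mathlib
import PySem

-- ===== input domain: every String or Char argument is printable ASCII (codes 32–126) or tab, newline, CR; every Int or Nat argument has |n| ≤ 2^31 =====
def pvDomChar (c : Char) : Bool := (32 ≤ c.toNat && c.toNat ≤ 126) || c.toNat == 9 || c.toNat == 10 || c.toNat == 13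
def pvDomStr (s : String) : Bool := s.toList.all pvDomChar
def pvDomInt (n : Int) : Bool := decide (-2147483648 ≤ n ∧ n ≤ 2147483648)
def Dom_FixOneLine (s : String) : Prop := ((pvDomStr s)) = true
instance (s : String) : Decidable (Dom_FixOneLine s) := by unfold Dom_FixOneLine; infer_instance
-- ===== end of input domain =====

-- B replaces A's repeated slicing (s = s[1:] / s = s[:-1] inside the strip loops) by two
-- single index-pointer scans from the front and from the back; same return value everywhere.

-- ===== PORT A =====
-- reverse_clousre on a 1-char string, as a Char map
def revClosure (c : Char) : Char :=
  if c = '(' then ')' else if c = ')' then '(' else c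

def startChars : List Char := ".,:;?()-?!+=*&$^%#@~`\" /".toList
def endChars : List Char := "(-*~`\" /".toList

-- while len(s) > 0 and s[0] in StartSpecialChars: Prefix += rc(s[0]); s = s[1:]
def aFront (acc : List Char) : List Char → List Char × List Char
  | [] => (acc, [])
  | c :: rest =>
      if c ∈ startChars then aFront (acc ++ [revClosure c]) rest else (acc, c :: rest)

-- while len(s) > 0 and s[-1] in EndSpecialChars: Suffix += rc(s[-1]); s = s[:-1]
def aBack (acc : List Char) (l : List Char) : List Char × List Char :=
  if h : l = [] then (acc, l)
  else
    let c := l.getLast h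
    if c ∈ endChars then aBack (acc ++ [revClosure c]) l.dropLast else (acc, l)
termination_by l.length
decreasing_by
  simp only [List.length_dropLast]
  have := List.length_pos_of_ne_nil h
  omega

def FixOneLine (s : String) : String :=
  let s1 := if PySem.Str.startswith s "-" && PySem.Str.endswith s "-" then
              PySem.Str.replace (PySem.Str.replace s "- " "") " -" "" else s
  let s2 := PySem.Str.replace s1 "<i>" ""
  let s3 := PySem.Str.replace s2 "</i>" ""
  let s4 := if PySem.Str.startswith s3 "-" && PySem.Str.endswith s3 "-" then
              PySem.Str.replace (PySem.Str.replace s3 "- " "") " -" "" else s3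
  let fr := aFront [] s4.toList
  let bk := aBack [] fr.2
  let pre := if fr.1 = [' ', '-'] then ['-', ' '] else fr.1
  let suf := if bk.1 = [' ', '-'] then ['-', ' '] else bk.1
  String.mk (suf ++ bk.2 ++ pre)

-- ===== PORT B =====
def FixOneLine_alt (s : String) : String :=
  let s1 := if PySem.Str.startswith s "-" && PySem.Str.endswith s "-" then
              PySem.Str.replace (PySem.Str.replace s "- " "") " -" "" else s
  let s2 := PySem.Str.replace (PySem.Str.replace s1 "<i>" "") "</i>" ""
  let t := if PySem.Str.startswith s2 "-" && PySem.Str.endswith s2 "-" then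
              PySem.Str.replace (PySem.Str.replace s2 "- " "") " -" "" else s2
  let l := t.toList
  -- forward scan: i stops at the first non-special char
  let preChars := l.takeWhile (· ∈ startChars)
  let rest := l.dropWhile (· ∈ startChars)
  -- backward scan: j walks down from the end
  let rev := rest.reverse
  let sufChars := rev.takeWhile (· ∈ endChars)
  let mid := (rev.dropWhile (· ∈ endChars)).reverse
  let pre := if preChars.map revClosure = [' ', '-'] then ['-', ' '] else preChars.map revClosure
  let suf := if sufChars.map revClosure = [' ', '-'] then ['-', ' '] else sufChars.map revClosure
  String.mk (suf ++ mid ++ pre)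

-- ===== PRECONDITION & SPEC =====
def Spec_FixOneLine (s : String) (out : String) : Prop := out = FixOneLine_alt s
instance (s : String) (out : String) : Decidable (Spec_FixOneLine s out) := by unfold Spec_FixOneLine; infer_instance

-- ===== CLAIM (what is proved, stated in full; the proofs are below) =====
def Claim_equal_FixOneLine : Prop := ∀ (s : String), Dom_FixOneLine s → Spec_FixOneLine s (FixOneLine s)

-- ===== LEMMAS AND PROOFS =====

theorem aFront_eq (l acc : List Char) :
    aFront acc l = (acc ++ (l.takeWhile (· ∈ startChars)).map revClosure,
                    l.dropWhile (· ∈ startChars)) := by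
  induction l generalizing acc with
  | nil => simp [aFront]
  | cons c rest ih =>
      by_cases h : c ∈ startChars
      · simp [aFront, h, ih, List.takeWhile_cons, List.dropWhile_cons]
      · simp [aFront, h, List.takeWhile_cons, List.dropWhile_cons]

theorem aBack_rev_eq (r acc : List Char) :
    aBack acc r.reverse = (acc ++ (r.takeWhile (· ∈ endChars)).map revClosure,
                           (r.dropWhile (· ∈ endChars)).reverse) := by
  induction r generalizing acc with
  | nil => simp [aBack]
  | cons c t ih =>
      have hne : t.reverse ++ [c] ≠ [] := by simp
      by_cases h : c ∈ endChars
      · rw [List.reverse_cons, aBack]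
        simp [hne, List.getLast_concat, h, List.dropLast_concat, ih,
              List.takeWhile_cons, List.dropWhile_cons]
      · rw [List.reverse_cons, aBack]
        simp [hne, List.getLast_concat, h, List.takeWhile_cons, List.dropWhile_cons]

theorem aBack_eq (m acc : List Char) :
    aBack acc m = (acc ++ (m.reverse.takeWhile (· ∈ endChars)).map revClosure,
                   (m.reverse.dropWhile (· ∈ endChars)).reverse) := by
  have := aBack_rev_eq m.reverse acc
  simpa using this

-- ===== VERDICT (by name: the statement is the Claim_ definition above) =====
set_option maxHeartbeats 1000000 in
theorem FixOneLine_spec : Claim_equal_FixOneLine := by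
  intro s _
  show FixOneLine s = FixOneLine_alt s
  rw [FixOneLine, FixOneLine_alt]
  generalize (if (PySem.Str.startswith
          (PySem.Str.replace (PySem.Str.replace
              (if (PySem.Str.startswith s "-" && PySem.Str.endswith s "-") = true then
                PySem.Str.replace (PySem.Str.replace s "- " "") " -" "" else s) "<i>" "") "</i>" "") "-" &&
        PySem.Str.endswith
          (PySem.Str.replace (PySem.Str.replace
              (if (PySem.Str.startswith s "-" && PySem.Str.endswith s "-") = true then
                PySem.Str.replace (PySem.Str.replace s "- " "") " -" "" else s) "<i>" "") "</i>" "") "-") = true then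
      PySem.Str.replace (PySem.Str.replace
          (PySem.Str.replace (PySem.Str.replace
              (if (PySem.Str.startswith s "-" && PySem.Str.endswith s "-") = true then
                PySem.Str.replace (PySem.Str.replace s "- " "") " -" "" else s) "<i>" "") "</i>" "") "- " "") " -" ""
    else
      PySem.Str.replace (PySem.Str.replace
          (if (PySem.Str.startswith s "-" && PySem.Str.endswith s "-") = true then
            PySem.Str.replace (PySem.Str.replace s "- " "") " -" "" else s) "<i>" "") "</i>" "").toList = l
  rw [aFront_eq, aBack_eq]
  simp only [List.nil_append]
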